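-- pv_equiv track=rewrite | github.com/Iqrar99/Project-Euler | problem42.py | generate
-- ===== SOURCE A (Python) =====
-- def triangle_number(n) -> int:
--     return n * (n + 1) // 2
--
-- def generate(constraint) -> set:
--     """
--     function to generate the triangle numbers sequence.
--     """
--     seq = set()
--     n = 1
--     number = triangle_number(n)
--
--     while number <= constraint:
--         seq.add(number)
--         n += 1
--         number = triangle_number(n)
--
--     return seq
-- ===== SOURCE B (Python) =====
-- def generate(constraint):
--     """
--     Generate the set of triangle numbers not exceeding constraint, by first
--     finding the largest index n_max with n_max*(n_max+1)//2 <= constraint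
--     via exponential + binary search, then building the set directly.
--     """
--     if constraint < 1:
--         return set()
--     hi = 1
--     while hi * (hi + 1) // 2 <= constraint:
--         hi *= 2
--     lo = 0
--     while hi - lo > 1:
--         mid = (lo + hi) // 2
--         if mid * (mid + 1) // 2 <= constraint:
--             lo = mid
--         else:
--             hi = mid
--     return {k * (k + 1) // 2 for k in range(1, lo + 1)}
-- ===== Notes on version B (the rewrite author's own statement) =====
-- stated objective: alternative
-- what changed: Instead of testing each successive triangle number against the constraint, B finds the largest admissible index n_max by exponential doubling plus binary search on the index and then builds the set with a single comprehension over the indices up to n_max.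
import Mathlib
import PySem

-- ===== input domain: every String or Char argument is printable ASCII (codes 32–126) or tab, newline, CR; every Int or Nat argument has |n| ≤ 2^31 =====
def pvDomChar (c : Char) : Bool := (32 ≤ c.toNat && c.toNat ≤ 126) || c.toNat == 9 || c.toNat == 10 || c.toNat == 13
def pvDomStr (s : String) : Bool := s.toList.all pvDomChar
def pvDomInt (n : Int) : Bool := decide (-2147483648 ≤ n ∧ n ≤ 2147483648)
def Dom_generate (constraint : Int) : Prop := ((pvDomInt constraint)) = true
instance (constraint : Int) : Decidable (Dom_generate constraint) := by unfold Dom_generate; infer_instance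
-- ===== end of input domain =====

-- B replaces A's one-by-one test of each triangle number by an exponential + binary
-- search for the largest admissible index, then builds the set in one pass (alternative algorithm).

-- ===== PORT A =====
def triangle_number (n : Int) : Int := PySem.Int.floordiv (n * (n + 1)) 2

-- n ≤ n(n+1)//2 for every integer n; cited by the loop's termination proof.
theorem triangle_number_self_le (n : Int) : n ≤ triangle_number n := by
  rw [triangle_number, (PySem.Int.le_floordiv_iff_mul_le (by omega) : n ≤ _ ↔ _)]
  rcases lt_or_ge n 1 with h | h
  · nlinarith [mul_nonneg (by omega : (0 : Int) ≤ -n) (by omega : (0 : Int) ≤ 1 - n)]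
  · nlinarith [mul_nonneg (by omega : (0 : Int) ≤ n) (by omega : (0 : Int) ≤ n - 1)]

def generateLoop (constraint n : Int) (seq : PySem.Set Int) : PySem.Set Int :=
  if triangle_number n ≤ constraint then
    generateLoop constraint (n + 1) (PySem.Set.add seq (triangle_number n))
  else seq
termination_by (constraint + 1 - n).toNat
decreasing_by
  have := triangle_number_self_le n
  omega

def generate (constraint : Int) : List Int := generateLoop constraint 1 PySem.Set.empty

-- ===== PORT B =====
-- smallest power-of-two multiple of the start with triangle number > constraint
def findHi (constraint hi : Int) (hpos : 1 ≤ hi) : Int :=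
  if PySem.Int.floordiv (hi * (hi + 1)) 2 ≤ constraint then
    findHi constraint (hi * 2) (by omega)
  else hi
termination_by (constraint + 1 - hi).toNat
decreasing_by
  have := triangle_number_self_le hi
  rw [triangle_number] at this
  omega

def bisect (constraint lo hi : Int) : Int :=
  if h : 1 < hi - lo then
    let mid := PySem.Int.floordiv (lo + hi) 2
    if PySem.Int.floordiv (mid * (mid + 1)) 2 ≤ constraint then
      bisect constraint mid hi
    else
      bisect constraint lo mid
  else lo
termination_by (hi - lo).toNat
decreasing_by
  · have h1 := (PySem.Int.le_floordiv_iff_mul_le (a := lo + hi) (b := 2) (q := lo + 1) (by omega)).2 (by omega)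
    have h2 := (PySem.Int.floordiv_lt_iff_lt_mul (a := lo + hi) (b := 2) (q := hi) (by omega)).2 (by omega)
    omega
  · have h1 := (PySem.Int.le_floordiv_iff_mul_le (a := lo + hi) (b := 2) (q := lo + 1) (by omega)).2 (by omega)
    have h2 := (PySem.Int.floordiv_lt_iff_lt_mul (a := lo + hi) (b := 2) (q := hi) (by omega)).2 (by omega)
    omega

def generate_alt (constraint : Int) : List Int :=
  if constraint < 1 then []
  else
    let hi := findHi constraint 1 (by omega)
    let lo := bisect constraint 0 hi
    PySem.Set.ofList
      ((PySem.List.pyRange 1 (lo + 1) 1).map (fun k => PySem.Int.floordiv (k * (k + 1)) 2))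

-- ===== PRECONDITION & SPEC =====
def Spec_generate (constraint : Int) (out : List Int) : Prop := out = generate_alt constraint
instance (constraint : Int) (out : List Int) : Decidable (Spec_generate constraint out) := by unfold Spec_generate; infer_instance

-- ===== CLAIM (what is proved, stated in full; the proofs are below) =====
def Claim_equal_generate : Prop := ∀ (constraint : Int), Dom_generate constraint → Spec_generate constraint (generate constraint)

-- ===== LEMMAS AND PROOFS =====

theorem triangle_number_exact (n : Int) : 2 * triangle_number n = n * (n + 1) := by
  obtain ⟨k, hk⟩ := Int.even_mul_succ_self n
  rw [triangle_number, PySem.Int.floordiv_eq_ediv_of_pos (by omega), hk]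
  omega

theorem triangle_number_mono {a b : Int} (ha : 0 ≤ a) (hab : a ≤ b) :
    triangle_number a ≤ triangle_number b := by
  have h1 := triangle_number_exact a
  have h2 := triangle_number_exact b
  nlinarith

-- the list [tri n, tri (n+1), …, tri (n+t-1)]
def triList (n : Int) : Nat → List Int
  | 0 => []
  | t + 1 => triangle_number n :: triList (n + 1) t

theorem findHi_spec (c : Int) : ∀ (hi : Int) (h : 1 ≤ hi),
    1 ≤ findHi c hi h ∧ c < triangle_number (findHi c hi h) := by
  intro hi h
  fun_induction findHi c hi h with
  | case1 hi h htri ih => exact ih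
  | case2 hi h htri => exact ⟨h, by rw [triangle_number]; omega⟩

theorem bisect_spec (c : Int) : ∀ (lo hi : Int),
    triangle_number lo ≤ c → c < triangle_number hi → lo < hi →
    lo ≤ bisect c lo hi ∧ triangle_number (bisect c lo hi) ≤ c ∧
      c < triangle_number (bisect c lo hi + 1) := by
  intro lo hi hlo hhi hlt
  fun_induction bisect c lo hi with
  | case1 lo hi h mid htri ih =>
    have h2 := (PySem.Int.floordiv_lt_iff_lt_mul (a := lo + hi) (b := 2) (q := hi) (by omega)).2 (by omega)
    have h1 := (PySem.Int.le_floordiv_iff_mul_le (a := lo + hi) (b := 2) (q := lo + 1) (by omega)).2 (by omega)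
    have := ih (by rw [triangle_number]; exact htri) hhi (by omega)
    exact ⟨by omega, this.2⟩
  | case2 lo hi h mid htri ih =>
    have h1 := (PySem.Int.le_floordiv_iff_mul_le (a := lo + hi) (b := 2) (q := lo + 1) (by omega)).2 (by omega)
    exact ih hlo (by rw [triangle_number]; omega) (by omega)
  | case3 lo hi h =>
    have : hi = lo + 1 := by omega
    exact ⟨le_refl _, hlo, by rw [← this]; exact hhi⟩

theorem generateLoop_eq (c N : Int) (hN0 : 0 ≤ N)
    (hNle : triangle_number N ≤ c) (hNgt : c < triangle_number (N + 1)) :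
    ∀ (t : Nat) (n : Int) (seq : PySem.Set Int), 1 ≤ n → (N + 1 - n).toNat = t →
      generateLoop c n seq = List.foldl PySem.Set.add seq (triList n t) := by
  intro t
  induction t with
  | zero =>
    intro n seq hn ht
    have hmono := triangle_number_mono (a := N + 1) (b := n) (by omega) (by omega)
    rw [generateLoop, if_neg (by omega), triList, List.foldl_nil]
  | succ t ih =>
    intro n seq hn ht
    have hmono := triangle_number_mono (a := n) (b := N) (by omega) (by omega)
    rw [generateLoop, if_pos (by omega), triList, List.foldl_cons]
    exact ih (n + 1) _ (by omega) (by omega)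

theorem map_pyRange_eq_triList : ∀ (t : Nat) (n : Int),
    (PySem.List.pyRange n (n + t) 1).map (fun k => PySem.Int.floordiv (k * (k + 1)) 2)
      = triList n t := by
  intro t
  induction t with
  | zero => intro n; simp [PySem.List.pyRange, triList]
  | succ t ih =>
    intro n
    rw [Nat.cast_add, Nat.cast_one, show n + ((t : Int) + 1) = (n + 1) + (t : Int) by ring]
    rw [PySem.List.pyRange_one_cons (by omega), List.map_cons, triList, ← triangle_number]
    rw [ih (n + 1)]

-- ===== VERDICT (by name: the statement is the Claim_ definition above) =====
theorem generate_spec : Claim_equal_generate := by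
  intro c _
  unfold Spec_generate generate generate_alt
  have t1 : triangle_number 1 = 1 := by decide
  have t0 : triangle_number 0 = 0 := by decide
  by_cases hc : c < 1
  · rw [if_pos hc, generateLoop, if_neg (by omega)]
    rfl
  · rw [if_neg hc]
    obtain ⟨hHpos, hHgt⟩ := findHi_spec c 1 (by omega)
    set H := findHi c 1 (by omega) with hH
    have hlo0 : triangle_number 0 ≤ c := by omega
    obtain ⟨hL0, hLle, hLgt⟩ := bisect_spec c 0 H hlo0 hHgt (by omega)
    set L := bisect c 0 H with hLdef
    rw [PySem.Set.ofList_eq_foldl]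
    rw [show L + 1 = 1 + (L.toNat : Int) by omega, map_pyRange_eq_triList L.toNat 1]
    exact generateLoop_eq c L hL0 hLle hLgt L.toNat 1 PySem.Set.empty (by omega) (by omega)
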